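-- pv_equiv track=rewrite | github.com/Episode5/Naruto-Bridge | tron_console.py | build_context_words
-- ===== SOURCE A (Python) =====
-- def extract_keywords(text):
--     """
--     Very simple keyword extractor:
--     - lowercase
--     - split on whitespace
--     - keep alphabetic-ish tokens of length >= 4
--     """
--     if not text:
--         return set()
--     words = []
--     for raw in text.lower().split():
--         w = "".join(ch for ch in raw if ch.isalpha())
--         if len(w) >= 4:
--             words.append(w)
--     return set(words)
--
-- def build_context_words(trace_log, glyph, events_obj):
--     context = set()
--
--     # From previous trace responses
--     for trace in trace_log.get("traces", []):
--         context |= extract_keywords(trace.get("response", ""))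
--
--     # From glyph themes
--     for theme in glyph.get("themes", []):
--         theme_clean = theme.replace("_", " ")
--         context |= extract_keywords(theme_clean)
--
--     # From event titles
--     for ev in events_obj.get("events", []):
--         context |= extract_keywords(ev.get("title", ""))
--
--     return context
-- ===== SOURCE B (Python) =====
-- def build_context_words(trace_log, glyph, events_obj):
--     # Build ONE combined corpus string (space-joined so tokens never merge
--     # across boundaries), then tokenize it in a single pass into a set.
--     parts = []
--     for trace in trace_log.get("traces", []):
--         parts.append(trace.get("response", ""))
--     for theme in glyph.get("themes", []):
--         parts.append(theme.replace("_", " "))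
--     for ev in events_obj.get("events", []):
--         parts.append(ev.get("title", ""))
--     corpus = " ".join(parts)
--     words = set()
--     for raw in corpus.lower().split():
--         w = "".join(ch for ch in raw if ch.isalpha())
--         if len(w) >= 4:
--             words.add(w)
--     return words
-- ===== Notes on version B (the rewrite author's own statement) =====
-- stated objective: alternative
-- what changed: Instead of A's three extract_keywords-and-set-union passes, B joins all source texts into one space-separated corpus string and tokenizes that corpus exactly once, adding tokens directly into the result set.
import Mathlib
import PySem

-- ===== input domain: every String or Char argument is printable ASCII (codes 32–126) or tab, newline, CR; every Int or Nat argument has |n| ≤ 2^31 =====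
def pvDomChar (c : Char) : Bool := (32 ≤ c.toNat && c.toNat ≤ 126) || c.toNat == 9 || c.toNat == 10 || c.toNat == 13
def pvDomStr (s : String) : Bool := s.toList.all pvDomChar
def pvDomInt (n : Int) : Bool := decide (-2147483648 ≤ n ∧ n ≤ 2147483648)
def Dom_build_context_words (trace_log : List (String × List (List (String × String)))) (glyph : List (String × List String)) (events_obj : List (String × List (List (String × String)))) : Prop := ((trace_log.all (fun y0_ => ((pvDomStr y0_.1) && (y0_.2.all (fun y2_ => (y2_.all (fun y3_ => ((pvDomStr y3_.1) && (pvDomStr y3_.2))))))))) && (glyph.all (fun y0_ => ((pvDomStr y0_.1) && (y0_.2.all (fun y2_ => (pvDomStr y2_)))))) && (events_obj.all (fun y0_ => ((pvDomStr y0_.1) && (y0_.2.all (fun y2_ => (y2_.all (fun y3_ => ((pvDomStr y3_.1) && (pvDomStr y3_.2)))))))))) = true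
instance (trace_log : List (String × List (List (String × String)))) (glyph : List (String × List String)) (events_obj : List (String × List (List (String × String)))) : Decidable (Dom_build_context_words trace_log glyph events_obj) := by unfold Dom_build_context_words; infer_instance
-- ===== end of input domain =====

-- B replaces A's three extract_keywords-and-set-union passes by joining all source texts
-- into one space-separated corpus string and tokenizing that corpus once (objective: alternative).

-- ===== PORT A =====
def extract_keywords (text : String) : PySem.Set String :=
  if text = "" then PySem.Set.empty
  else
    let words := (PySem.Str.split₀ (PySem.Str.lower text)).foldl
      (fun acc raw =>
        let wl := raw.toList.filter (fun ch => PySem.Chars.isalpha ch)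
        if 4 ≤ wl.length then acc ++ [String.ofList wl] else acc) []
    PySem.Set.ofList words

def build_context_words (trace_log : List (String × List (List (String × String)))) (glyph : List (String × List String)) (events_obj : List (String × List (List (String × String)))) : List String :=
  let context : PySem.Set String := PySem.Set.empty
  let context := (PySem.Dict.getD (PySem.Dict.mk trace_log) "traces" []).foldl
    (fun ctx trace => PySem.Set.union ctx (extract_keywords (PySem.Dict.getD (PySem.Dict.mk trace) "response" ""))) context
  let context := (PySem.Dict.getD (PySem.Dict.mk glyph) "themes" []).foldl
    (fun ctx theme => PySem.Set.union ctx (extract_keywords (PySem.Str.replace theme "_" " "))) context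
  let context := (PySem.Dict.getD (PySem.Dict.mk events_obj) "events" []).foldl
    (fun ctx ev => PySem.Set.union ctx (extract_keywords (PySem.Dict.getD (PySem.Dict.mk ev) "title" ""))) context
  context

-- ===== PORT B =====
def build_context_words_alt (trace_log : List (String × List (List (String × String)))) (glyph : List (String × List String)) (events_obj : List (String × List (List (String × String)))) : List String :=
  let parts : List String := []
  let parts := (PySem.Dict.getD (PySem.Dict.mk trace_log) "traces" []).foldl
    (fun ps trace => ps ++ [PySem.Dict.getD (PySem.Dict.mk trace) "response" ""]) parts
  let parts := (PySem.Dict.getD (PySem.Dict.mk glyph) "themes" []).foldl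
    (fun ps theme => ps ++ [PySem.Str.replace theme "_" " "]) parts
  let parts := (PySem.Dict.getD (PySem.Dict.mk events_obj) "events" []).foldl
    (fun ps ev => ps ++ [PySem.Dict.getD (PySem.Dict.mk ev) "title" ""]) parts
  let corpus := PySem.Str.join " " parts
  (PySem.Str.split₀ (PySem.Str.lower corpus)).foldl
    (fun words raw =>
      let wl := raw.toList.filter (fun ch => PySem.Chars.isalpha ch)
      if 4 ≤ wl.length then PySem.Set.add words (String.ofList wl) else words)
    PySem.Set.empty

-- ===== PRECONDITION & SPEC =====
def Spec_build_context_words (trace_log : List (String × List (List (String × String)))) (glyph : List (String × List String)) (events_obj : List (String × List (List (String × String)))) (out : List String) : Prop := out = build_context_words_alt trace_log glyph events_obj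
instance (trace_log : List (String × List (List (String × String)))) (glyph : List (String × List String)) (events_obj : List (String × List (List (String × String)))) (out : List String) : Decidable (Spec_build_context_words trace_log glyph events_obj out) := by unfold Spec_build_context_words; infer_instance

-- ===== CLAIM (what is proved, stated in full; the proofs are below) =====
def Claim_equal_build_context_words : Prop := ∀ (trace_log : List (String × List (List (String × String)))) (glyph : List (String × List String)) (events_obj : List (String × List (List (String × String)))), Dom_build_context_words trace_log glyph events_obj → Spec_build_context_words trace_log glyph events_obj (build_context_words trace_log glyph events_obj)

-- ===== LEMMAS AND PROOFS =====

-- the token list a single text contributes (proof helper)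
def bcwTokens (text : String) : List String :=
  ((PySem.Str.split₀ (PySem.Str.lower text)).filter
      (fun raw => 4 ≤ (raw.toList.filter (fun ch => PySem.Chars.isalpha ch)).length)).map
    (fun raw => String.ofList (raw.toList.filter (fun ch => PySem.Chars.isalpha ch)))

-- append-if fold = filter-then-map
theorem foldl_append_if_eq {α β : Type} (p : α → Prop) [DecidablePred p] (g : α → β) :
    ∀ (l : List α) (acc : List β),
      l.foldl (fun acc x => if p x then acc ++ [g x] else acc) acc
        = acc ++ (l.filter (fun x => decide (p x))).map g := by
  intro l
  induction l with
  | nil => intro acc; simp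
  | cons a l ih =>
      intro acc
      by_cases h : p a <;> simp [h, ih]

theorem extract_eq_ofList_tokens (t : String) :
    extract_keywords t = PySem.Set.ofList (bcwTokens t) := by
  by_cases h : t = ""
  · subst h; rfl
  · simp only [extract_keywords, bcwTokens, h, if_false]
    rw [foldl_append_if_eq]
    rfl

theorem union_ofList_eq_update (s : PySem.Set String) (ws : List String) :
    PySem.Set.union s (PySem.Set.ofList ws) = PySem.Set.update s ws := by
  simp [PySem.Set.union, PySem.Set.update_eq_append_filter, PySem.Set.ofList_ofList]

theorem foldl_union_flatMap {α : Type} (g : α → List String) :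
    ∀ (l : List α) (s : PySem.Set String),
      l.foldl (fun s x => PySem.Set.union s (PySem.Set.ofList (g x))) s
        = PySem.Set.update s (l.flatMap g) := by
  intro l
  induction l with
  | nil => intro s; simp [PySem.Set.update]
  | cons a l ih =>
      intro s
      rw [List.foldl_cons, ih, union_ofList_eq_update, List.flatMap_cons,
        PySem.Set.update_append]

-- append-singleton fold = map
theorem foldl_append_singleton {α β : Type} (g : α → β) :
    ∀ (l : List α) (acc : List β),
      l.foldl (fun acc x => acc ++ [g x]) acc = acc ++ l.map g := by
  intro l
  induction l with
  | nil => intro acc; simp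
  | cons a l ih => intro acc; simp [ih]

-- add-if fold = update with the filtered/mapped token list
theorem foldl_add_if_eq (p : String → Prop) [DecidablePred p] (g : String → String) :
    ∀ (l : List String) (s : PySem.Set String),
      l.foldl (fun ws raw => if p raw then PySem.Set.add ws (g raw) else ws) s
        = PySem.Set.update s ((l.filter (fun x => decide (p x))).map g) := by
  intro l
  induction l with
  | nil => intro s; simp [PySem.Set.update]
  | cons a l ih =>
      intro s
      by_cases h : p a <;> simp [h, ih, PySem.Set.update]

-- split₀.go with a nonempty accumulator
theorem split₀_go_acc :
    ∀ (s cur : List Char) (acc : List (List Char)),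
      PySem.Chars.split₀.go s cur acc = acc.reverse ++ PySem.Chars.split₀.go s cur [] := by
  intro s
  induction s with
  | nil =>
      intro cur acc
      by_cases h : cur.isEmpty = true <;> simp [PySem.Chars.split₀.go, h]
  | cons c rest ih =>
      intro cur acc
      by_cases hs : PySem.Chars.isspace c = true
      · by_cases hc : cur.isEmpty = true
        · simp only [PySem.Chars.split₀.go, hs, hc, if_true]
          exact ih [] acc
        · simp only [PySem.Chars.split₀.go, hs, hc, if_true, Bool.false_eq_true, if_false]
          rw [ih [] (cur.reverse :: acc), ih [] [cur.reverse]]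
          simp
      · simp only [PySem.Chars.split₀.go, hs, Bool.false_eq_true, if_false]
        exact ih _ _

theorem split₀_append_space (ys : List Char) :
    ∀ (xs cur : List Char) (acc : List (List Char)),
      PySem.Chars.split₀.go (xs ++ ' ' :: ys) cur acc
        = PySem.Chars.split₀.go xs cur acc ++ PySem.Chars.split₀.go ys [] [] := by
  intro xs
  induction xs with
  | nil =>
      intro cur acc
      have hsp : PySem.Chars.isspace ' ' = true := by decide
      by_cases hc : cur.isEmpty = true
      · simp only [List.nil_append, PySem.Chars.split₀.go, hsp, hc, if_true]
        exact split₀_go_acc ys [] acc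
      · simp only [List.nil_append, PySem.Chars.split₀.go, hsp, hc, if_true, Bool.false_eq_true, if_false]
        exact split₀_go_acc ys [] (cur.reverse :: acc)
  | cons c rest ih =>
      intro cur acc
      by_cases hs : PySem.Chars.isspace c = true
      · by_cases hc : cur.isEmpty = true <;>
          simp [PySem.Chars.split₀.go, hs, hc, ih]
      · simp [PySem.Chars.split₀.go, hs, ih]

theorem chars_split₀_space (xs ys : List Char) :
    PySem.Chars.split₀ (xs ++ ' ' :: ys)
      = PySem.Chars.split₀ xs ++ PySem.Chars.split₀ ys := by
  simp [PySem.Chars.split₀, split₀_append_space]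

theorem chars_split_lower_join :
    ∀ (ls : List (List Char)),
      PySem.Chars.split₀ (PySem.Chars.lower (PySem.Chars.join [' '] ls))
        = ls.flatMap (fun l => PySem.Chars.split₀ (PySem.Chars.lower l)) := by
  intro ls
  induction ls with
  | nil => decide
  | cons a tl ih =>
      cases tl with
      | nil => simp [PySem.Chars.join, List.intercalate]
      | cons b tl' =>
          have hj : PySem.Chars.join [' '] (a :: b :: tl')
              = a ++ ' ' :: PySem.Chars.join [' '] (b :: tl') := by
            simp [PySem.Chars.join, List.intercalate, List.intersperse]
          have hl : PySem.Chars.lower (a ++ ' ' :: PySem.Chars.join [' '] (b :: tl'))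
              = PySem.Chars.lower a ++ ' ' :: PySem.Chars.lower (PySem.Chars.join [' '] (b :: tl')) := by
            simp [PySem.Chars.lower]
            decide
          rw [hj, hl, chars_split₀_space, ih]
          simp

theorem str_split_lower_join (parts : List String) :
    PySem.Str.split₀ (PySem.Str.lower (PySem.Str.join " " parts))
      = parts.flatMap (fun p => PySem.Str.split₀ (PySem.Str.lower p)) := by
  have h : (PySem.Str.lower (PySem.Str.join " " parts)).toList
      = PySem.Chars.lower (PySem.Chars.join [' '] (parts.map String.toList)) := by
    simp [PySem.Str.lower, PySem.Str.join]
  simp only [PySem.Str.split₀, h, chars_split_lower_join, List.flatMap_map]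
  rw [List.map_flatMap]
  apply List.flatMap_congr
  intro p _
  simp [PySem.Str.lower]

-- each text's contribution, through join-then-split, is its own token list
theorem tokens_join (parts : List String) :
    (((PySem.Str.split₀ (PySem.Str.lower (PySem.Str.join " " parts))).filter
        (fun raw => 4 ≤ (raw.toList.filter (fun ch => PySem.Chars.isalpha ch)).length)).map
      (fun raw => String.ofList (raw.toList.filter (fun ch => PySem.Chars.isalpha ch))))
      = parts.flatMap bcwTokens := by
  rw [str_split_lower_join, List.filter_flatMap, List.map_flatMap]
  rfl

-- ===== VERDICT (by name: the statement is the Claim_ definition above) =====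
theorem build_context_words_spec : Claim_equal_build_context_words := by
  intro trace_log glyph events_obj _
  show build_context_words trace_log glyph events_obj = build_context_words_alt trace_log glyph events_obj
  simp only [build_context_words, build_context_words_alt, extract_eq_ofList_tokens,
    foldl_union_flatMap, foldl_append_singleton, foldl_add_if_eq, tokens_join]
  simp [← PySem.Set.update_append, List.flatMap_append, List.flatMap_map]
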